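-- pv_equiv track=rewrite | github.com/BriceBoy/el_documentor | src/parts_finder.py | get_full_keywords
-- ===== SOURCE A (Python) =====
-- def is_new_keyword(line):
--     """
--     Fonction pour vérifier si la ligne actuelle correspond à un nouveau keyword
--     """
--     if (line and not line.startswith("  ") and not line.startswith("***")):
--         return True
--     else:
--         return False
--
-- def get_full_keywords(lines):
--     """
--     Fonction qui renvoie un tableau avec le contenu complet de chaque keyword par case
--     """
--     keywords = []
--     currentLines = []
--     for line in lines:
--         if (not is_new_keyword(line)):
--             currentLines.append(line)
--         else:
--             keywords.append(currentLines)
--             currentLines = []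
--             currentLines.append(line)
--     keywords.append(currentLines)
--     return keywords
-- ===== SOURCE B (Python) =====
-- def is_new_keyword(line):
--     """
--     Fonction pour vérifier si la ligne actuelle correspond à un nouveau keyword
--     """
--     if (line and not line.startswith("  ") and not line.startswith("***")):
--         return True
--     else:
--         return False
--
-- def _body_end(lines, i):
--     """Index of the first keyword line at or after position i."""
--     while i < len(lines) and not is_new_keyword(lines[i]):
--         i += 1
--     return i
--
-- def get_full_keywords(lines):
--     """
--     Fonction qui renvoie un tableau avec le contenu complet de chaque keyword par case
--     """
--     j = _body_end(lines, 0)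
--     out = [lines[:j]]
--     while j < len(lines):
--         k = _body_end(lines, j + 1)
--         out.append(lines[j:k])
--         j = k
--     return out
-- ===== Notes on version B (the rewrite author's own statement) =====
-- stated objective: alternative
-- what changed: Replaces the single per-line accumulator loop with per-branch appends by a boundary-index decomposition: a helper scans for the next keyword index, and the result is built as the leading slice lines[:j] followed by one slice lines[j:k] per keyword block.
import Mathlib
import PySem

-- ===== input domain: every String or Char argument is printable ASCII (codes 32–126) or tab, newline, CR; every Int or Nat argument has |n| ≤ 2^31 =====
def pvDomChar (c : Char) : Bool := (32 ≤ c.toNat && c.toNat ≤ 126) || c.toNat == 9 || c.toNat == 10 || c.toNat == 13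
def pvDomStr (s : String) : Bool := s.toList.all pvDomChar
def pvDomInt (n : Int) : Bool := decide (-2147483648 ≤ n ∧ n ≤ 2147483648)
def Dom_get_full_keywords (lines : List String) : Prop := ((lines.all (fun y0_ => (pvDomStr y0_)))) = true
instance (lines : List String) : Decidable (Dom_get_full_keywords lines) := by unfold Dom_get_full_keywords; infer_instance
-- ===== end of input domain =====

-- B replaces A's per-line accumulator loop by a boundary-index scan that emits each keyword block as a slice (same O(n) cost).


-- ===== PORT A =====
-- is_new_keyword: truthiness of the string = nonempty (PySem.Str.len), startswith via PySem.Str.startswith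
def is_new_keyword (line : String) : Bool :=
  (PySem.Str.len line != 0) && !(PySem.Str.startswith line "  ") && !(PySem.Str.startswith line "***")

def get_full_keywords (lines : List String) : List (List String) :=
  let st := lines.foldl
      (fun (st : List (List String) × List String) line =>
        if !(is_new_keyword line) then (st.1, st.2 ++ [line])
        else (st.1 ++ [st.2], [line]))
      ([], [])
  st.1 ++ [st.2]

-- ===== PORT B =====
-- _body_end's while loop: first index ≥ i holding a keyword line
def body_end (lines : List String) (i : Nat) : Nat :=
  if h : i < lines.length then
    if is_new_keyword lines[i] then i else body_end lines (i + 1)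
  else i
  termination_by lines.length - i

-- used by loopB's termination proof (cited in decreasing_by): body_end never moves backwards
lemma le_body_end (lines : List String) (i : Nat) : i ≤ body_end lines i := by
  fun_induction body_end lines i with
  | case1 => exact Nat.le_refl _
  | case2 _ _ _ ih => exact Nat.le_trans (Nat.le_succ _) ih
  | case3 => exact Nat.le_refl _

-- B's 'while j < len(lines):' loop; lines[j:k] with 0 ≤ j ≤ k is (lines.drop j).take (k - j), exact here
def loopB (lines : List String) (j : Nat) : List (List String) :=
  if j < lines.length then
    let k := body_end lines (j + 1)
    ((lines.drop j).take (k - j)) :: loopB lines k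
  else []
  termination_by lines.length - j
  decreasing_by
    have := le_body_end lines (j + 1)
    omega

def get_full_keywords_alt (lines : List String) : List (List String) :=
  let j := body_end lines 0
  lines.take j :: loopB lines j   -- lines[:j], 0 ≤ j: exactly List.take

-- ===== PRECONDITION & SPEC =====
def Spec_get_full_keywords (lines : List String) (out : List (List String)) : Prop := out = get_full_keywords_alt lines
instance (lines : List String) (out : List (List String)) : Decidable (Spec_get_full_keywords lines out) := by unfold Spec_get_full_keywords; infer_instance

-- ===== CLAIM (what is proved, stated in full; the proofs are below) =====
def Claim_equal_get_full_keywords : Prop := ∀ (lines : List String), Dom_get_full_keywords lines → Spec_get_full_keywords lines (get_full_keywords lines)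

-- ===== LEMMAS AND PROOFS =====

-- proof-side structural description of the block split: length of the leading non-keyword body
def splitIdx : List String → Nat
  | [] => 0
  | x :: rest => if is_new_keyword x then 0 else splitIdx rest + 1

-- proof-side structural version of B's while loop, consuming the list block by block
def blocksB : List String → List (List String)
  | [] => []
  | kw :: tail =>
      (kw :: tail.take (splitIdx tail)) :: blocksB (tail.drop (splitIdx tail))
  termination_by xs => xs.length
  decreasing_by simp

lemma blocksB_nil : blocksB [] = [] := by rw [blocksB]

lemma blocksB_cons (kw : String) (tail : List String) :
    blocksB (kw :: tail) = (kw :: tail.take (splitIdx tail)) :: blocksB (tail.drop (splitIdx tail)) := by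
  rw [blocksB]

-- body_end in terms of splitIdx of the remaining suffix
lemma body_end_eq (lines : List String) (i : Nat) :
    body_end lines i = i + splitIdx (lines.drop i) := by
  fun_induction body_end lines i with
  | case1 i h hkw =>
    rw [List.drop_eq_getElem_cons h]
    simp [splitIdx, hkw]
  | case2 i h hkw ih =>
    rw [ih, List.drop_eq_getElem_cons h]
    simp [splitIdx, hkw]
    omega
  | case3 i h =>
    rw [List.drop_eq_nil_of_le (by omega)]
    simp [splitIdx]

-- B's index loop computes the structural block list of the suffix
lemma loopB_eq_blocksB (lines : List String) (j : Nat) :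
    loopB lines j = blocksB (lines.drop j) := by
  fun_induction loopB lines j with
  | case1 j h k ih =>
    rw [ih, List.drop_eq_getElem_cons h, blocksB_cons]
    have hk : k = j + 1 + splitIdx (lines.drop (j + 1)) := body_end_eq lines (j + 1)
    rw [hk]
    have h1 : j + 1 + splitIdx (lines.drop (j + 1)) - j = splitIdx (lines.drop (j + 1)) + 1 := by
      omega
    rw [h1, List.take_succ_cons, List.drop_drop]
  | case2 j h =>
    rw [List.drop_eq_nil_of_le (by omega), blocksB_nil]

-- Invariant of A's fold: finishing from state (ks, cur) yields ks, then cur extended by the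
-- leading body, then the structural blocks of the rest.
lemma foldA_eq_blocks (lines : List String) :
    ∀ (ks : List (List String)) (cur : List String),
      (lines.foldl
        (fun (st : List (List String) × List String) line =>
          if !(is_new_keyword line) then (st.1, st.2 ++ [line])
          else (st.1 ++ [st.2], [line]))
        (ks, cur)).1 ++
      [(lines.foldl
        (fun (st : List (List String) × List String) line =>
          if !(is_new_keyword line) then (st.1, st.2 ++ [line])
          else (st.1 ++ [st.2], [line]))
        (ks, cur)).2]
      = ks ++ (cur ++ lines.take (splitIdx lines)) :: blocksB (lines.drop (splitIdx lines)) := by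
  induction lines with
  | nil => intro ks cur; simp [splitIdx, blocksB_nil]
  | cons l ls ih =>
    intro ks cur
    by_cases h : is_new_keyword l = true
    · simp only [List.foldl_cons, h, Bool.not_true, Bool.false_eq_true, if_false]
      rw [ih (ks ++ [cur]) [l]]
      simp [splitIdx, h, blocksB_cons]
    · simp only [List.foldl_cons, h, Bool.not_false, if_pos]
      rw [ih ks (cur ++ [l])]
      simp [splitIdx, h]

-- ===== VERDICT (by name: the statement is the Claim_ definition above) =====
theorem get_full_keywords_spec : Claim_equal_get_full_keywords := by
  intro lines _
  unfold Spec_get_full_keywords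
  simp only [get_full_keywords, get_full_keywords_alt, loopB_eq_blocksB, body_end_eq]
  simpa using foldA_eq_blocks lines [] []
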